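-- pv_equiv track=rewrite | github.com/Utkarshsingh90/Minimum_Spanning_Tree_Visualisation | app.py | loop_erased_path
-- ===== SOURCE A (Python) =====
-- from typing import List, Tuple, Dict
--
-- def loop_erased_path(path: List) -> List:
--     pos = {}
--     res = []
--     for v in path:
--         if v in pos:
--             idx = pos[v]
--             res = res[:idx + 1]
--             pos = {res[i]: i for i in range(len(res))}
--         else:
--             pos[v] = len(res)
--             res.append(v)
--     return res
-- ===== SOURCE B (Python) =====
-- def loop_erased_path(path):
--     res = []
--     seen = set()
--     for v in path:
--         if v in seen:
--             while res[-1] != v: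
--                 seen.discard(res.pop())
--         else:
--             seen.add(v)
--             res.append(v)
--     return res
-- ===== Notes on version B (the rewrite author's own statement) =====
-- stated objective: faster
-- what changed: Instead of rebuilding the position dict after every revisit (O(n) per revisit, O(n^2) total), B keeps a membership set and pops only the truncated tail elements, removing each from the set, so overall work is O(n).
import Mathlib
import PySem

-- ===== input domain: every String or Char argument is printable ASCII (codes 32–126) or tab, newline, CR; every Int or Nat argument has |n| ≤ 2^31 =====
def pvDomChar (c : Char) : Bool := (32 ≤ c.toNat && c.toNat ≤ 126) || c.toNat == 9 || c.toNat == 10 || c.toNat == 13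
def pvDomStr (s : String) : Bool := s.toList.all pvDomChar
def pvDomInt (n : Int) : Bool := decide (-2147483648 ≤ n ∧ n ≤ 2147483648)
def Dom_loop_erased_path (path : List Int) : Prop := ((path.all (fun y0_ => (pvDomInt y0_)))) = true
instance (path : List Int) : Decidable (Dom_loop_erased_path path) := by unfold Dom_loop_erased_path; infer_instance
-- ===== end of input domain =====

-- B keeps a membership set and on a revisit pops only the truncated tail elements instead of
-- rebuilding the whole position dict (asymptotically faster); return values are identical.

-- ===== PORT A =====
-- pos = {res[i]: i for i in range(len(res))}
def pvRebuild (res : List Int) : PySem.Dict Int Int :=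
  (PySem.List.pyRange 0 (PySem.List.len res) 1).foldl
    (fun d i => d.insert (PySem.List.pyGetD res i 0) i) PySem.Dict.empty

def pvStepA (st : PySem.Dict Int Int × List Int) (v : Int) : PySem.Dict Int Int × List Int :=
  if st.1.contains v then
    let idx := st.1.getD v 0
    let res := PySem.List.slice st.2 none (some (idx + 1))
    (pvRebuild res, res)
  else
    (st.1.insert v (PySem.List.len st.2), st.2 ++ [v])

def loop_erased_path (path : List Int) : List Int :=
  (path.foldl pvStepA (PySem.Dict.empty, [])).2

-- ===== PORT B =====
-- while res[-1] != v: seen.discard(res.pop())   (acts on the reversed list)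
def pvPop (v : Int) : List Int → PySem.Set Int → List Int × PySem.Set Int
  | [], seen => ([], seen)
  | x :: rest, seen =>
    if x ≠ v then pvPop v rest (PySem.Set.discard seen x) else (x :: rest, seen)

def pvStepB (st : List Int × PySem.Set Int) (v : Int) : List Int × PySem.Set Int :=
  if PySem.Set.contains st.2 v then
    let p := pvPop v st.1.reverse st.2
    (p.1.reverse, p.2)
  else
    (st.1 ++ [v], PySem.Set.add st.2 v)

def loop_erased_path_alt (path : List Int) : List Int :=
  (path.foldl pvStepB ([], PySem.Set.empty)).1

-- ===== PRECONDITION & SPEC =====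
def Spec_loop_erased_path (path : List Int) (out : List Int) : Prop := out = loop_erased_path_alt path
instance (path : List Int) (out : List Int) : Decidable (Spec_loop_erased_path path out) := by unfold Spec_loop_erased_path; infer_instance

-- ===== CLAIM (what is proved, stated in full; the proofs are below) =====
def Claim_equal_loop_erased_path : Prop := ∀ (path : List Int), Dom_loop_erased_path path → Spec_loop_erased_path path (loop_erased_path path)

-- ===== LEMMAS AND PROOFS =====

lemma pvRebuild_eq (res : List Int) :
    pvRebuild res = (List.range res.length).foldl
      (fun d i => d.insert (res.getD i 0) (i : Int)) PySem.Dict.empty := by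
  unfold pvRebuild
  rw [PySem.List.len_eq, PySem.List.pyRange_zero_natCast, List.foldl_map]
  simp [PySem.List.pyGetD_natCast]

lemma pvRebuild_snoc (res : List Int) (v : Int) :
    pvRebuild (res ++ [v]) = (pvRebuild res).insert v (res.length : Int) := by
  simp only [pvRebuild_eq, List.length_append, List.length_singleton]
  rw [List.range_succ, List.foldl_append]
  simp only [List.foldl_cons, List.foldl_nil]
  have h1 : (List.range res.length).foldl
      (fun d i => d.insert ((res ++ [v]).getD i 0) (i : Int)) PySem.Dict.empty
      = (List.range res.length).foldl
      (fun d i => d.insert (res.getD i 0) (i : Int)) PySem.Dict.empty := by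
    apply PySem.List.foldl_congr_mem
    intro d i hi
    have hlt : i < res.length := List.mem_range.mp hi
    simp [List.getD_eq_getElem?_getD, List.getElem?_append_left hlt]
  rw [h1]
  congr 1
  simp [List.getD_eq_getElem?_getD]

lemma pvRebuild_contains (res : List Int) (x : Int) :
    (pvRebuild res).contains x = decide (x ∈ res) := by
  induction res using List.reverseRecOn with
  | nil => rw [pvRebuild_eq]; simp
  | append_singleton res v ih =>
    rw [pvRebuild_snoc, PySem.Dict.contains_insert, ih]
    by_cases h : x = v <;> simp [h]

lemma pvRebuild_getD (res : List Int) (hnd : res.Nodup) (x : Int) (hx : x ∈ res) :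
    (pvRebuild res).getD x 0 = (res.idxOf x : Int) := by
  induction res using List.reverseRecOn with
  | nil => simp at hx
  | append_singleton res v ih =>
    have hnd' : res.Nodup ∧ v ∉ res := by
      rw [List.nodup_append] at hnd
      refine ⟨hnd.1, fun hv => ?_⟩
      exact hnd.2.2 v hv v (List.mem_singleton_self v) rfl
    rw [pvRebuild_snoc, PySem.Dict.getD_insert]
    by_cases h : x = v
    · subst h
      rw [if_pos rfl, List.idxOf_append_of_notMem hnd'.2]
      simp
    · have hx' : x ∈ res := by
        rcases List.mem_append.mp hx with h' | h'
        · exact h'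
        · exact absurd (List.mem_singleton.mp h') h
      rw [if_neg h, ih hnd'.1 hx', List.idxOf_append_of_mem hx']

lemma pvPop_spec (v : Int) (l t : List Int) (s : PySem.Set Int) (hv : v ∉ l) :
    pvPop v (l ++ v :: t) s = (v :: t, l.foldl PySem.Set.discard s) := by
  induction l generalizing s with
  | nil => simp [pvPop]
  | cons x xs ih =>
    have hxv : x ≠ v := fun h => hv (h ▸ List.mem_cons_self)
    simp only [List.cons_append, pvPop, if_pos hxv, List.foldl_cons]
    exact ih _ (fun h => hv (List.mem_cons_of_mem _ h))

lemma mem_foldl_discard (l : List Int) (s : PySem.Set Int) (x : Int) :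
    x ∈ l.foldl PySem.Set.discard s ↔ x ∈ s ∧ x ∉ l := by
  induction l generalizing s with
  | nil => simp
  | cons a as ih =>
    simp only [List.foldl_cons, ih, PySem.Set.mem_discard, List.mem_cons]
    tauto

lemma pvSet_contains_decide (s : PySem.Set Int) (x : Int) :
    PySem.Set.contains s x = decide (x ∈ s) := by
  by_cases h : x ∈ s
  · simp [h]
  · simp only [h, decide_false]
    rw [← Bool.not_eq_true]
    simp [h]

lemma main_loop (path : List Int) : ∀ (res : List Int) (seen : PySem.Set Int),
    res.Nodup → (∀ x : Int, x ∈ seen ↔ x ∈ res) →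
    (path.foldl pvStepA (pvRebuild res, res)).2 = (path.foldl pvStepB (res, seen)).1 := by
  induction path with
  | nil => intro res seen _ _; rfl
  | cons v rest ih =>
    intro res seen hnd hmem
    simp only [List.foldl_cons]
    have hcA : (pvRebuild res).contains v = decide (v ∈ res) := pvRebuild_contains res v
    have hcB : PySem.Set.contains seen v = decide (v ∈ res) := by
      rw [pvSet_contains_decide]
      by_cases h : v ∈ res <;> simp [h, hmem]
    by_cases hv : v ∈ res
    · -- revisit branch
      set i := res.idxOf v with hi_def
      have hi : i < res.length := List.idxOf_lt_length_of_mem hv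
      have hgetv : res[i] = v := List.getElem_idxOf hi
      have hdecomp : res = res.take i ++ v :: res.drop (i + 1) := by
        conv_lhs => rw [← List.take_append_drop i res]
        rw [List.drop_eq_getElem_cons hi, hgetv]
      have htake : res.take (i + 1) = res.take i ++ [v] := by
        rw [List.take_add_one, List.getElem?_eq_getElem hi, hgetv]
        rfl
      have hnodup2 : (res.take i ++ v :: res.drop (i + 1)).Nodup := hdecomp ▸ hnd
      rw [List.nodup_append, List.nodup_cons] at hnodup2
      obtain ⟨hnd_take, ⟨hv_drop, hnd_drop⟩, hdisj⟩ := hnodup2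
      -- A's step
      have hA : pvStepA (pvRebuild res, res) v = (pvRebuild (res.take (i + 1)), res.take (i + 1)) := by
        unfold pvStepA
        rw [hcA, if_pos (by simp [hv])]
        have hidx : (pvRebuild res).getD v 0 = (i : Int) := pvRebuild_getD res hnd v hv
        simp only [hidx]
        have hslice : PySem.List.slice res none (some ((i : Int) + 1)) = res.take (i + 1) := by
          rw [show ((i : Int) + 1) = ((i + 1 : Nat) : Int) by push_cast; ring]
          exact PySem.List.slice_to_natCast res (i + 1)
        rw [hslice]
      -- B's step
      have hrev : res.reverse = (res.drop (i + 1)).reverse ++ v :: (res.take i).reverse := by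
        conv_lhs => rw [hdecomp]
        simp
      have hvnot : v ∉ (res.drop (i + 1)).reverse := by simpa using hv_drop
      have hB : pvStepB (res, seen) v =
          (res.take (i + 1), ((res.drop (i + 1)).reverse).foldl PySem.Set.discard seen) := by
        unfold pvStepB
        rw [hcB, if_pos (by simp [hv])]
        rw [hrev, pvPop_spec v _ _ seen hvnot]
        simp [htake]
      rw [hA, hB]
      apply ih
      · exact (List.take_sublist (i + 1) res).nodup hnd
      · intro x
        rw [mem_foldl_discard, List.mem_reverse, hmem, htake]
        constructor
        · rintro ⟨hxres, hxdrop⟩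
          rw [hdecomp, List.mem_append, List.mem_cons] at hxres
          rcases hxres with h' | h' | h'
          · simp [h']
          · simp [h']
          · exact absurd h' hxdrop
        · intro hx
          refine ⟨?_, ?_⟩
          · rw [hdecomp]
            rcases List.mem_append.mp hx with h' | h'
            · exact List.mem_append.mpr (Or.inl h')
            · simp [List.mem_singleton.mp h']
          · rcases List.mem_append.mp hx with h' | h'
            · exact fun hd => hdisj x h' x (List.mem_cons_of_mem _ hd) rfl
            · rw [List.mem_singleton.mp h']; exact hv_drop
    · -- fresh vertex branch
      have hA : pvStepA (pvRebuild res, res) v = (pvRebuild (res ++ [v]), res ++ [v]) := by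
        unfold pvStepA
        rw [hcA, if_neg (by simp [hv])]
        rw [pvRebuild_snoc, PySem.List.len_eq]
      have hB : pvStepB (res, seen) v = (res ++ [v], PySem.Set.add seen v) := by
        unfold pvStepB
        rw [hcB, if_neg (by simp [hv])]
      rw [hA, hB]
      apply ih
      · rw [List.nodup_append]
        refine ⟨hnd, List.nodup_singleton v, ?_⟩
        intro x hx y hy hxy
        rw [List.mem_singleton.mp hy] at hxy
        rw [hxy] at hx
        exact hv hx
      · intro x
        rw [PySem.Set.mem_add, hmem, List.mem_append, List.mem_singleton]

-- ===== VERDICT (by name: the statement is the Claim_ definition above) =====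
theorem loop_erased_path_spec : Claim_equal_loop_erased_path := by
  intro path _
  unfold Spec_loop_erased_path loop_erased_path loop_erased_path_alt
  have h0 : pvRebuild [] = PySem.Dict.empty := by rw [pvRebuild_eq]; simp
  rw [← h0]
  exact main_loop path [] PySem.Set.empty List.nodup_nil (by simp [PySem.Set.empty])
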